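-- pv_equiv track=rewrite | github.com/snehaaiyer/shehn.ai-local | vendor_algorithm_implementation.py | is_same_state
-- ===== SOURCE A (Python) =====
-- def is_same_state(city1: str, city2: str) -> bool:
--     """Check if cities are in the same state (simplified logic)"""
--     state_cities = {
--         'maharashtra': ['mumbai', 'pune', 'nagpur'],
--         'delhi': ['delhi', 'gurgaon', 'noida'],
--         'karnataka': ['bangalore', 'mysore'],
--         'tamil_nadu': ['chennai', 'coimbatore']
--     }
--
--     for state, cities in state_cities.items():
--         if city1 in cities and city2 in cities:
--             return True
--     return False
-- ===== SOURCE B (Python) =====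
-- _CITY_TO_STATE = {
--     'mumbai': 'maharashtra', 'pune': 'maharashtra', 'nagpur': 'maharashtra',
--     'delhi': 'delhi', 'gurgaon': 'delhi', 'noida': 'delhi',
--     'bangalore': 'karnataka', 'mysore': 'karnataka',
--     'chennai': 'tamil_nadu', 'coimbatore': 'tamil_nadu',
-- }
--
-- def is_same_state(city1: str, city2: str) -> bool:
--     s1 = _CITY_TO_STATE.get(city1)
--     return s1 is not None and s1 == _CITY_TO_STATE.get(city2)
-- ===== Notes on version B (the rewrite author's own statement) =====
-- stated objective: idiomatic
-- what changed: B replaces A's loop over states with per-state double membership tests by a precomputed inverted city->state dict and two direct lookups (false when either city is absent).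
import Mathlib
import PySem

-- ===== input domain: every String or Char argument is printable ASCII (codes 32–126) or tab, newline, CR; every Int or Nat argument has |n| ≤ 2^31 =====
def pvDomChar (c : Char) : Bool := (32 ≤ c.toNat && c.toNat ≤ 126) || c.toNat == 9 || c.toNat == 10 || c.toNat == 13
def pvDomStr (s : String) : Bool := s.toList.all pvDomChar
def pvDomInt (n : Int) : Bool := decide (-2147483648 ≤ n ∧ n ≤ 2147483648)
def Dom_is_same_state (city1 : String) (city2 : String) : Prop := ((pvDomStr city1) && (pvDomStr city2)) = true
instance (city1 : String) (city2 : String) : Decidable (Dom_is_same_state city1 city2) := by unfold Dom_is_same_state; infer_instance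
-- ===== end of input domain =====

-- B replaces A's loop over states by a precomputed inverted city->state dict and two direct lookups (idiomatic; return value only).

-- ===== PORT A =====
-- the literal dict of A, as an insertion-ordered association list
def pvStateCities : List (String × List String) :=
  [("maharashtra", ["mumbai", "pune", "nagpur"]),
   ("delhi", ["delhi", "gurgaon", "noida"]),
   ("karnataka", ["bangalore", "mysore"]),
   ("tamil_nadu", ["chennai", "coimbatore"])]

-- the 'for state, cities in state_cities.items()' loop with early return
def pvLoopA (city1 city2 : String) : List (String × List String) → Bool
  | [] => false
  | (_, cities) :: rest =>
    if cities.contains city1 && cities.contains city2 then true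
    else pvLoopA city1 city2 rest

def is_same_state (city1 : String) (city2 : String) : Bool :=
  pvLoopA city1 city2 pvStateCities

-- ===== PORT B =====
def pvCityToState : PySem.Dict String String :=
  PySem.Dict.ofList
    [("mumbai", "maharashtra"), ("pune", "maharashtra"), ("nagpur", "maharashtra"),
     ("delhi", "delhi"), ("gurgaon", "delhi"), ("noida", "delhi"),
     ("bangalore", "karnataka"), ("mysore", "karnataka"),
     ("chennai", "tamil_nadu"), ("coimbatore", "tamil_nadu")]

def is_same_state_alt (city1 : String) (city2 : String) : Bool :=
  match pvCityToState.get? city1 with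
  | none => false
  | some s1 => pvCityToState.get? city2 == some s1

-- ===== PRECONDITION & SPEC =====
def Spec_is_same_state (city1 : String) (city2 : String) (out : Bool) : Prop := out = is_same_state_alt city1 city2
instance (city1 : String) (city2 : String) (out : Bool) : Decidable (Spec_is_same_state city1 city2 out) := by unfold Spec_is_same_state; infer_instance

-- ===== CLAIM (what is proved, stated in full; the proofs are below) =====
def Claim_equal_is_same_state : Prop := ∀ (city1 : String) (city2 : String), Dom_is_same_state city1 city2 → Spec_is_same_state city1 city2 (is_same_state city1 city2)

-- ===== LEMMAS AND PROOFS =====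
theorem pvCityToState_mk : pvCityToState = PySem.Dict.mk
    [("mumbai", "maharashtra"), ("pune", "maharashtra"), ("nagpur", "maharashtra"),
     ("delhi", "delhi"), ("gurgaon", "delhi"), ("noida", "delhi"),
     ("bangalore", "karnataka"), ("mysore", "karnataka"),
     ("chennai", "tamil_nadu"), ("coimbatore", "tamil_nadu")] := by decide

-- c is none of the ten known cities
def pvUnknown (c : String) : Prop :=
  ¬c = "mumbai" ∧ ¬c = "pune" ∧ ¬c = "nagpur" ∧ ¬c = "delhi" ∧ ¬c = "gurgaon" ∧ ¬c = "noida" ∧ ¬c = "bangalore" ∧ ¬c = "mysore" ∧ ¬c = "chennai" ∧ ¬c = "coimbatore"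

theorem pv_cases (c : String) :
    c = "mumbai" ∨ c = "pune" ∨ c = "nagpur" ∨ c = "delhi" ∨ c = "gurgaon" ∨ c = "noida" ∨ c = "bangalore" ∨ c = "mysore" ∨ c = "chennai" ∨ c = "coimbatore" ∨ pvUnknown c := by
  unfold pvUnknown
  by_cases h1 : c = "mumbai"
  · exact Or.inl h1
  by_cases h2 : c = "pune"
  · exact Or.inr (Or.inl h2)
  by_cases h3 : c = "nagpur"
  · exact Or.inr (Or.inr (Or.inl h3))
  by_cases h4 : c = "delhi"
  · exact Or.inr (Or.inr (Or.inr (Or.inl h4)))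
  by_cases h5 : c = "gurgaon"
  · exact Or.inr (Or.inr (Or.inr (Or.inr (Or.inl h5))))
  by_cases h6 : c = "noida"
  · exact Or.inr (Or.inr (Or.inr (Or.inr (Or.inr (Or.inl h6)))))
  by_cases h7 : c = "bangalore"
  · exact Or.inr (Or.inr (Or.inr (Or.inr (Or.inr (Or.inr (Or.inl h7))))))
  by_cases h8 : c = "mysore"
  · exact Or.inr (Or.inr (Or.inr (Or.inr (Or.inr (Or.inr (Or.inr (Or.inl h8)))))))
  by_cases h9 : c = "chennai"
  · exact Or.inr (Or.inr (Or.inr (Or.inr (Or.inr (Or.inr (Or.inr (Or.inr (Or.inl h9))))))))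
  by_cases h10 : c = "coimbatore"
  · exact Or.inr (Or.inr (Or.inr (Or.inr (Or.inr (Or.inr (Or.inr (Or.inr (Or.inr (Or.inl h10)))))))))
  exact Or.inr (Or.inr (Or.inr (Or.inr (Or.inr (Or.inr (Or.inr (Or.inr (Or.inr (Or.inr (⟨h1, h2, h3, h4, h5, h6, h7, h8, h9, h10⟩))))))))))

theorem pv_get_none (c : String) (h : pvUnknown c) : pvCityToState.get? c = none := by
  obtain ⟨n1, n2, n3, n4, n5, n6, n7, n8, n9, n10⟩ := h
  have e1 : ("mumbai" == c) = false := beq_eq_false_iff_ne.mpr (fun hh => n1 hh.symm)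
  have e2 : ("pune" == c) = false := beq_eq_false_iff_ne.mpr (fun hh => n2 hh.symm)
  have e3 : ("nagpur" == c) = false := beq_eq_false_iff_ne.mpr (fun hh => n3 hh.symm)
  have e4 : ("delhi" == c) = false := beq_eq_false_iff_ne.mpr (fun hh => n4 hh.symm)
  have e5 : ("gurgaon" == c) = false := beq_eq_false_iff_ne.mpr (fun hh => n5 hh.symm)
  have e6 : ("noida" == c) = false := beq_eq_false_iff_ne.mpr (fun hh => n6 hh.symm)
  have e7 : ("bangalore" == c) = false := beq_eq_false_iff_ne.mpr (fun hh => n7 hh.symm)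
  have e8 : ("mysore" == c) = false := beq_eq_false_iff_ne.mpr (fun hh => n8 hh.symm)
  have e9 : ("chennai" == c) = false := beq_eq_false_iff_ne.mpr (fun hh => n9 hh.symm)
  have e10 : ("coimbatore" == c) = false := beq_eq_false_iff_ne.mpr (fun hh => n10 hh.symm)
  simp [pvCityToState_mk, e1, e2, e3, e4, e5, e6, e7, e8, e9, e10, PySem.Dict.get?]

theorem pvA_none_left (c1 c2 : String) (h : pvUnknown c1) : is_same_state c1 c2 = false := by
  obtain ⟨n1, n2, n3, n4, n5, n6, n7, n8, n9, n10⟩ := h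
  simp [is_same_state, pvStateCities, pvLoopA, n1, n2, n3, n4, n5, n6, n7, n8, n9, n10]

theorem pvA_none_right (c1 c2 : String) (h : pvUnknown c2) : is_same_state c1 c2 = false := by
  obtain ⟨n1, n2, n3, n4, n5, n6, n7, n8, n9, n10⟩ := h
  simp [is_same_state, pvStateCities, pvLoopA, n1, n2, n3, n4, n5, n6, n7, n8, n9, n10]

theorem pvB_none_left (c1 c2 : String) (h : pvUnknown c1) : is_same_state_alt c1 c2 = false := by
  simp [is_same_state_alt, pv_get_none c1 h]

theorem pvB_none_right (c1 c2 : String) (h : pvUnknown c2) : is_same_state_alt c1 c2 = false := by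
  rcases hg : pvCityToState.get? c1 with _ | s1 <;>
    simp [is_same_state_alt, hg, pv_get_none c2 h]

theorem pv_eqv (c1 c2 : String) : is_same_state c1 c2 = is_same_state_alt c1 c2 := by
  rcases pv_cases c1 with h|h|h|h|h|h|h|h|h|h|hu <;>
    rcases pv_cases c2 with g|g|g|g|g|g|g|g|g|g|gu <;>
      first
      | rw [pvA_none_left c1 c2 hu, pvB_none_left c1 c2 hu]
      | rw [pvA_none_right c1 c2 gu, pvB_none_right c1 c2 gu]
      | (subst_vars; decide)

-- ===== VERDICT (by name: the statement is the Claim_ definition above) =====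
theorem is_same_state_spec : Claim_equal_is_same_state := by
  intro c1 c2 _
  unfold Spec_is_same_state
  exact pv_eqv c1 c2
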